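-- pv_equiv track=rewrite | github.com/azgarian/rootNumberDetection | src/training/dataloader.py | _build_group_stats
-- ===== SOURCE A (Python) =====
-- from typing import Callable, Dict, Iterable, List, Optional, Tuple
--
-- def _build_group_stats(pids: List[str], labels: List[int]) -> Tuple[Dict[str, List[int]], Dict[str, List[int]], List[int]]:
--     classes = sorted(set(int(l) for l in labels))
--     pos = {c: i for i, c in enumerate(classes)}
--     group_to_counts: Dict[str, List[int]] = {}
--     group_to_indices: Dict[str, List[int]] = {}
--     total = [0] * len(classes)
--     for i, gid in enumerate(pids):
--         if gid not in group_to_counts: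
--             group_to_counts[gid] = [0] * len(classes)
--             group_to_indices[gid] = []
--         group_to_indices[gid].append(i)
--         j = pos[int(labels[i])]
--         group_to_counts[gid][j] += 1
--         total[j] += 1
--     return group_to_indices, group_to_counts, total
-- ===== SOURCE B (Python) =====
-- def _build_group_stats(pids, labels):
--     classes = sorted(set(int(l) for l in labels))
--     group_to_indices = {}
--     for i, gid in enumerate(pids):
--         group_to_indices.setdefault(gid, []).append(i)
--     group_to_counts = {}
--     for g, idxs in group_to_indices.items():
--         freq = {}
--         for i in idxs:
--             l = int(labels[i])
--             freq[l] = freq.get(l, 0) + 1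
--         group_to_counts[g] = [freq.get(c, 0) for c in classes]
--     freq_all = {}
--     for i in range(len(pids)):
--         l = int(labels[i])
--         freq_all[l] = freq_all.get(l, 0) + 1
--     total = [freq_all.get(c, 0) for c in classes]
--     return group_to_indices, group_to_counts, total
-- ===== Notes on version B (the rewrite author's own statement) =====
-- stated objective: alternative
-- what changed: B builds only the index dict in the single pass, then derives each group's count vector and the total by counting labels per class directly (comprehensions), instead of A's in-place increment of count vectors and a running total via a class-to-position dict.
import Mathlib
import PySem

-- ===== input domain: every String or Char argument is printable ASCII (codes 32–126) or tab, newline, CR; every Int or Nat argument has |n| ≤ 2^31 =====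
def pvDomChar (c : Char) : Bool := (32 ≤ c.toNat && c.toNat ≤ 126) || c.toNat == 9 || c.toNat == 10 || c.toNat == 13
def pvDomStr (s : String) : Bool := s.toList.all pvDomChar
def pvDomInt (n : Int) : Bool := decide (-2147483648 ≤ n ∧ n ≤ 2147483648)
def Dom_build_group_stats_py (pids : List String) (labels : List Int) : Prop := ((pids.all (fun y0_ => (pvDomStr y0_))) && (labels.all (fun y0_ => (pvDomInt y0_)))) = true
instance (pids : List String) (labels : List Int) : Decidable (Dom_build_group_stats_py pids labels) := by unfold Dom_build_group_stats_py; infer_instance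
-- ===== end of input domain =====

-- B replaces A's single mutating pass (position dict + in-place count increments) by one pass
-- building only the index dict and then deriving each count vector and the total by direct
-- per-class counting; alternative decomposition, same results.


-- ===== PORT A =====
-- A's loop body as a named helper: one step of the enumerate(pids) loop, threading the state
-- (group_to_counts, group_to_indices, total).  `d[k].append(v)` / `d[k][j] += 1` on a key known
-- to be present are ported as Dict.modify (exact: d[k] = f(d.get(k, dflt))).
def pvStepA (labels : List Int) (pos : PySem.Dict Int Int) (m : Nat)
    (st : PySem.Dict String (List Int) × PySem.Dict String (List Int) × List Int)
    (p : Int × String) :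
    PySem.Dict String (List Int) × PySem.Dict String (List Int) × List Int :=
  let gtc := st.1
  let gti := st.2.1
  let total := st.2.2
  let gg := if gtc.contains p.2 then (gtc, gti)
            else (gtc.insert p.2 (List.replicate m (0 : Int)), gti.insert p.2 [])
  let gti' := gg.2.modify p.2 [] (fun v => v ++ [p.1])
  let j := pos.getD (PySem.List.pyGetD labels p.1 0) 0
  let gtc' := gg.1.modify p.2 [] (fun v => PySem.List.pySetD v j (PySem.List.pyGetD v j 0 + 1))
  let total' := PySem.List.pySetD total j (PySem.List.pyGetD total j 0 + 1)
  (gtc', gti', total')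

def build_group_stats_py (pids : List String) (labels : List Int) :
    (List (String × List Int)) × (List (String × List Int)) × List Int :=
  let classes : List Int := PySem.List.sorted (PySem.Set.ofList labels) (fun l => l) false
  let pos : PySem.Dict Int Int :=
    (PySem.List.enumerate classes 0).foldl (fun d p => d.insert p.2 p.1) PySem.Dict.empty
  let res := (PySem.List.enumerate pids 0).foldl (pvStepA labels pos classes.length)
    (PySem.Dict.empty, PySem.Dict.empty, List.replicate classes.length (0 : Int))
  (res.2.1.items, res.1.items, res.2.2)

-- ===== PORT B =====
-- `group_to_indices.setdefault(gid, []).append(i)` is exactly Dict.modify gid [] (· ++ [i]);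
-- `freq[l] = freq.get(l, 0) + 1` is exactly Dict.modify l 0 (· + 1).
def build_group_stats_py_alt (pids : List String) (labels : List Int) :
    (List (String × List Int)) × (List (String × List Int)) × List Int :=
  let classes : List Int := PySem.List.sorted (PySem.Set.ofList labels) (fun l => l) false
  let gti : PySem.Dict String (List Int) :=
    (PySem.List.enumerate pids 0).foldl
      (fun d p => d.modify p.2 [] (fun v => v ++ [p.1])) PySem.Dict.empty
  let gtc : PySem.Dict String (List Int) :=
    gti.items.foldl
      (fun d q =>
        let freq : PySem.Dict Int Int :=
          q.2.foldl (fun f i => f.modify (PySem.List.pyGetD labels i 0) 0 (fun v => v + 1))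
            PySem.Dict.empty
        d.insert q.1 (classes.map (fun c => freq.getD c 0)))
      PySem.Dict.empty
  let freqAll : PySem.Dict Int Int :=
    (PySem.List.pyRange 0 (pids.length : Int) 1).foldl
      (fun f i => f.modify (PySem.List.pyGetD labels i 0) 0 (fun v => v + 1)) PySem.Dict.empty
  let total : List Int := classes.map (fun c => freqAll.getD c 0)
  (gti.items, gtc.items, total)

-- ===== PRECONDITION & SPEC =====
-- A indexes labels[i] for every i < len(pids): when len(pids) > len(labels) it raises IndexError.
def Pre_build_group_stats_py (pids : List String) (labels : List Int) : Prop :=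
  pids.length ≤ labels.length
instance (pids : List String) (labels : List Int) : Decidable (Pre_build_group_stats_py pids labels) := by unfold Pre_build_group_stats_py; infer_instance

def pvWitness_build_group_stats_py : List String × List Int := (["a", "b", "a"], [1, 0, 1])

def Spec_build_group_stats_py (pids : List String) (labels : List Int) (out : (List (String × List Int)) × (List (String × List Int)) × List Int) : Prop := out = build_group_stats_py_alt pids labels
instance (pids : List String) (labels : List Int) (out : (List (String × List Int)) × (List (String × List Int)) × List Int) : Decidable (Spec_build_group_stats_py pids labels out) := by unfold Spec_build_group_stats_py; infer_instance

-- ===== CLAIM (what is proved, stated in full; the proofs are below) =====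
def Claim_equal_build_group_stats_py : Prop := ∀ (pids : List String) (labels : List Int), Dom_build_group_stats_py pids labels → Pre_build_group_stats_py pids labels → Spec_build_group_stats_py pids labels (build_group_stats_py pids labels)

-- ===== LEMMAS AND PROOFS =====

-- the sorted class list, the index list of a group, and the per-class count vector of an index list
def pvClasses (labels : List Int) : List Int :=
  PySem.List.sorted (PySem.Set.ofList labels) (fun l => l) false
def pvIdxs (pids : List String) (g : String) : List Int :=
  ((PySem.List.enumerate pids 0).filter (fun p => p.2 == g)).map (fun p => p.1)
def pvCnt (labels classes : List Int) (is : List Int) : List Int :=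
  classes.map (fun c => ((is.countP (fun i => PySem.List.pyGetD labels i 0 == c) : Nat) : Int))
def pvPos (classes : List Int) : PySem.Dict Int Int :=
  (PySem.List.enumerate classes 0).foldl (fun d p => d.insert p.2 p.1) PySem.Dict.empty

theorem pvClasses_nodup (labels : List Int) : (pvClasses labels).Nodup := by
  have hp := PySem.List.sorted_perm (PySem.Set.ofList labels) (fun l : Int => l) false
  exact hp.nodup_iff.mpr (PySem.Set.nodup_ofList labels)

theorem pvPos_getD (classes : List Int) (hnd : classes.Nodup) (k : Nat) (hk : k < classes.length) :
    (pvPos classes).getD (classes[k]) 0 = (k : Int) := by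
  have hfresh : ∀ a ∈ PySem.List.enumerate classes 0,
      (PySem.Dict.empty : PySem.Dict Int Int).contains a.2 = false := by
    intro a _; exact PySem.Dict.contains_empty a.2
  have hnd2 : ((PySem.List.enumerate classes 0).map (fun p => p.2)).Nodup := by
    rw [PySem.List.map_snd_enumerate]; exact hnd
  have hitems := PySem.Dict.items_foldl_insert_fresh (PySem.List.enumerate classes 0)
      (fun p => p.2) (fun p => p.1) PySem.Dict.empty hfresh hnd2
  have hkeysnd : (pvPos classes).keys.Nodup := by
    exact PySem.Dict.nodup_keys_foldl_insert_key (PySem.List.enumerate classes 0)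
      (fun p => p.2) (fun _ p => p.1) PySem.Dict.empty (by simp [PySem.Dict.keys_empty])
  have hmem : ((classes[k] : Int), (k : Int)) ∈ (pvPos classes).items := by
    rw [show (pvPos classes).items = _ from hitems]
    simp only [show (PySem.Dict.empty : PySem.Dict Int Int).items = [] from rfl, List.nil_append]
    refine List.mem_map.mpr ⟨(PySem.List.enumerate classes 0)[k]'(by simp [PySem.List.length_enumerate, hk]), List.getElem_mem _, ?_⟩
    rw [PySem.List.getElem_enumerate]
    simp
  exact PySem.Dict.getD_of_mem_items (pvPos classes) hmem hkeysnd 0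

theorem pv_inc_vec (classes : List Int) (hnd : classes.Nodup) (k : Nat) (hk : k < classes.length)
    (cnt : Int → Int) :
    PySem.List.pySetD (classes.map cnt) (k : Int)
      (PySem.List.pyGetD (classes.map cnt) (k : Int) 0 + 1)
    = classes.map (fun c => cnt c + if classes[k] == c then 1 else 0) := by
  rw [PySem.List.pySetD_natCast, PySem.List.pyGetD_natCast]
  apply List.ext_getElem
  · simp
  · intro l hl hl2
    have hlc : l < classes.length := by simpa using hl2
    rw [List.getElem_set]
    by_cases hlk : l = k
    · subst hlk
      simp [List.getD_eq_getElem?_getD, List.getElem?_eq_getElem (by simpa using hl : l < (classes.map cnt).length)]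
    · have hne : classes[k] ≠ classes[l] := by
        intro he
        exact hlk ((List.Nodup.getElem_inj_iff hnd).mp he.symm)
      rw [if_neg (fun h => hlk h.symm)]
      simp [hne]

theorem pvCnt_append (labels classes : List Int) (is : List Int) (i : Int) :
    pvCnt labels classes (is ++ [i])
    = classes.map (fun c =>
        ((is.countP (fun i => PySem.List.pyGetD labels i 0 == c) : Nat) : Int)
        + if PySem.List.pyGetD labels i 0 == c then 1 else 0) := by
  unfold pvCnt
  apply List.map_congr_left
  intro c _
  rw [List.countP_append]
  by_cases h : PySem.List.pyGetD labels i 0 == c <;> simp [h]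

-- B's frequency dict projected onto classes is the per-class count vector
theorem pv_freq_vec (labels classes : List Int) (is : List Int) :
    classes.map (fun c =>
      (is.foldl (fun f i => f.modify (PySem.List.pyGetD labels i 0) 0 (fun v => v + 1))
        (PySem.Dict.empty : PySem.Dict Int Int)).getD c 0)
    = pvCnt labels classes is := by
  apply List.map_congr_left
  intro c _
  rw [show is.foldl (fun f i => f.modify (PySem.List.pyGetD labels i 0) 0 (fun v => v + 1))
        (PySem.Dict.empty : PySem.Dict Int Int)
      = (is.map (fun i => PySem.List.pyGetD labels i 0)).foldl
          (fun f x => f.modify x 0 (fun v => v + 1)) PySem.Dict.empty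
    from (@List.foldl_map Int Int (PySem.Dict Int Int) (fun i => PySem.List.pyGetD labels i 0)
        (fun f x => f.modify x 0 (fun v => v + 1)) is PySem.Dict.empty).symm]
  rw [PySem.Dict.getD_foldl_modify_add_one]
  rw [show (PySem.Dict.empty : PySem.Dict Int Int).getD c 0 = 0 from rfl, zero_add]
  rw [List.count_eq_countP, List.countP_map]
  rfl

-- the crux: A's increment-at-pos step advances the count vector of an index list by one index
theorem pv_step_cnt (labels classes : List Int) (hnd : classes.Nodup) (is : List Int) (i : Int)
    (hx : PySem.List.pyGetD labels i 0 ∈ classes) :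
    PySem.List.pySetD (pvCnt labels classes is)
      ((pvPos classes).getD (PySem.List.pyGetD labels i 0) 0)
      (PySem.List.pyGetD (pvCnt labels classes is)
        ((pvPos classes).getD (PySem.List.pyGetD labels i 0) 0) 0 + 1)
    = pvCnt labels classes (is ++ [i]) := by
  obtain ⟨k, hk, hke⟩ := List.getElem_of_mem hx
  rw [pvCnt_append]
  have hpos : (pvPos classes).getD (PySem.List.pyGetD labels i 0) 0 = (k : Int) := by
    rw [← hke]; exact pvPos_getD classes hnd k hk
  rw [hpos]
  rw [show pvCnt labels classes is
      = classes.map (fun c => ((is.countP (fun j => PySem.List.pyGetD labels j 0 == c) : Nat) : Int)) from rfl]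
  rw [pv_inc_vec classes hnd k hk]
  apply List.map_congr_left
  intro c _
  rw [hke]

theorem pv_label_mem (labels : List Int) (i : Nat) (hi : i < labels.length) :
    PySem.List.pyGetD labels (i : Int) 0 ∈ pvClasses labels := by
  rw [PySem.List.pyGetD_natCast]
  rw [pvClasses, PySem.List.mem_sorted, PySem.Set.mem_ofList]
  rw [List.getD_eq_getElem?_getD, List.getElem?_eq_getElem hi]
  simp [List.getElem_mem]

theorem pvIdxs_append (pids : List String) (x : String) (g : String) :
    pvIdxs (pids ++ [x]) g
    = pvIdxs pids g ++ (if x == g then [((pids.length : Nat) : Int)] else []) := by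
  unfold pvIdxs
  rw [PySem.List.enumerate_append, List.filter_append, List.map_append]
  congr 1
  by_cases h : x == g <;>
    simp [PySem.List.enumerate_cons, PySem.List.enumerate_nil, h]

theorem pvIdxs_not_mem (pids : List String) (g : String) (h : g ∉ pids) :
    pvIdxs pids g = [] := by
  unfold pvIdxs
  rw [List.filter_eq_nil_iff.mpr, List.map_nil]
  intro p hp
  obtain ⟨k, hk, rfl⟩ := (PySem.List.mem_enumerate_iff _ _ _).mp hp
  simp only [beq_iff_eq]
  intro he
  exact h (he ▸ List.getElem_mem hk)

theorem pv_dedup_append (xs : List String) (x : String) :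
    PySem.List.dedup (xs ++ [x])
    = if x ∈ xs then PySem.List.dedup xs else PySem.List.dedup xs ++ [x] := by
  simp only [PySem.List.dedup_eq_ofList, PySem.Set.ofList_eq_foldl, List.foldl_append,
    List.foldl_cons, List.foldl_nil]
  by_cases h : x ∈ xs <;>
    simp [PySem.Set.add, PySem.Set.contains, h, ← PySem.Set.ofList_eq_foldl, PySem.Set.mem_ofList]

-- the invariant of A's loop
def pvFoldA (labels : List Int) (pids : List String) :
    PySem.Dict String (List Int) × PySem.Dict String (List Int) × List Int :=
  (PySem.List.enumerate pids 0).foldl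
    (pvStepA labels (pvPos (pvClasses labels)) (pvClasses labels).length)
    (PySem.Dict.empty, PySem.Dict.empty, List.replicate (pvClasses labels).length (0 : Int))

theorem pv_foldA (labels : List Int) (pids : List String) (h : pids.length ≤ labels.length) :
    (pvFoldA labels pids).1.keys = PySem.List.dedup pids
    ∧ (pvFoldA labels pids).2.1.keys = PySem.List.dedup pids
    ∧ (∀ g ∈ pids, (pvFoldA labels pids).1.getD g []
        = pvCnt labels (pvClasses labels) (pvIdxs pids g))
    ∧ (∀ g ∈ pids, (pvFoldA labels pids).2.1.getD g [] = pvIdxs pids g)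
    ∧ (pvFoldA labels pids).2.2
        = pvCnt labels (pvClasses labels) ((PySem.List.enumerate pids 0).map (fun p => p.1)) := by
  induction pids using List.reverseRecOn with
  | nil =>
      refine ⟨rfl, rfl, by simp, by simp, ?_⟩
      simp [pvFoldA, PySem.List.enumerate_nil, pvCnt]
  | append_singleton xs x ih =>
      have hxs : xs.length ≤ labels.length := by simp at h; omega
      obtain ⟨ih1, ih2, ih3, ih4, ih5⟩ := ih hxs
      have hncl : (pvClasses labels).Nodup := pvClasses_nodup labels
      have hfold : pvFoldA labels (xs ++ [x])
          = pvStepA labels (pvPos (pvClasses labels)) (pvClasses labels).length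
              (pvFoldA labels xs) (((xs.length : Nat) : Int), x) := by
        rw [pvFoldA, PySem.List.enumerate_append, List.foldl_append]
        simp [PySem.List.enumerate_cons, PySem.List.enumerate_nil, pvFoldA]
      have hlab : PySem.List.pyGetD labels ((xs.length : Nat) : Int) 0 ∈ pvClasses labels :=
        pv_label_mem labels xs.length (by simp at h; omega)
      have hall : (PySem.List.enumerate (xs ++ [x]) 0).map (fun p => p.1)
          = (PySem.List.enumerate xs 0).map (fun p => p.1) ++ [((xs.length : Nat) : Int)] := by
        rw [PySem.List.enumerate_append]
        simp [PySem.List.enumerate_cons, PySem.List.enumerate_nil]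
      set R := pvFoldA labels xs with hR
      by_cases hx : x ∈ xs
      · -- repeated group: no insert branch
        have hc : R.1.contains x = true :=
          (PySem.Dict.contains_iff_mem_keys _ _).mpr (ih1 ▸ (PySem.List.mem_dedup _ _).mpr hx)
        have hstep : pvFoldA labels (xs ++ [x])
            = (R.1.modify x []
                (fun v => PySem.List.pySetD v
                  ((pvPos (pvClasses labels)).getD (PySem.List.pyGetD labels ((xs.length : Nat) : Int) 0) 0)
                  (PySem.List.pyGetD v
                    ((pvPos (pvClasses labels)).getD (PySem.List.pyGetD labels ((xs.length : Nat) : Int) 0) 0) 0 + 1)),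
               R.2.1.modify x [] (fun v => v ++ [((xs.length : Nat) : Int)]),
               PySem.List.pySetD R.2.2
                 ((pvPos (pvClasses labels)).getD (PySem.List.pyGetD labels ((xs.length : Nat) : Int) 0) 0)
                 (PySem.List.pyGetD R.2.2
                   ((pvPos (pvClasses labels)).getD (PySem.List.pyGetD labels ((xs.length : Nat) : Int) 0) 0) 0 + 1)) := by
          rw [hfold, pvStepA]
          simp only [hc, if_true]
        rw [hstep]
        refine ⟨?_, ?_, ?_, ?_, ?_⟩
        · rw [PySem.Dict.keys_modify, PySem.Dict.keys_insert_of_contains _ _ hc, ih1,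
            pv_dedup_append, if_pos hx]
        · have hc2 : R.2.1.contains x = true :=
            (PySem.Dict.contains_iff_mem_keys _ _).mpr (ih2 ▸ (PySem.List.mem_dedup _ _).mpr hx)
          rw [PySem.Dict.keys_modify, PySem.Dict.keys_insert_of_contains _ _ hc2, ih2,
            pv_dedup_append, if_pos hx]
        · intro g hg
          rw [PySem.Dict.getD_modify]
          by_cases hgx : g = x
          · subst hgx
            rw [if_pos rfl, ih3 g hx, pv_step_cnt labels _ hncl _ _ hlab,
              pvIdxs_append, if_pos (by simp)]
          · have hgxs : g ∈ xs := by
              rcases List.mem_append.mp hg with h1 | h1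
              · exact h1
              · exact absurd (List.mem_singleton.mp h1) hgx
            rw [if_neg hgx, ih3 g hgxs, pvIdxs_append,
              if_neg (by simp; exact fun h => hgx h.symm), List.append_nil]
        · intro g hg
          rw [PySem.Dict.getD_modify]
          by_cases hgx : g = x
          · subst hgx
            rw [if_pos rfl, ih4 g hx, pvIdxs_append, if_pos (by simp)]
          · have hgxs : g ∈ xs := by
              rcases List.mem_append.mp hg with h1 | h1
              · exact h1
              · exact absurd (List.mem_singleton.mp h1) hgx
            rw [if_neg hgx, ih4 g hgxs, pvIdxs_append,
              if_neg (by simp; exact fun h => hgx h.symm), List.append_nil]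
        · rw [hall, ih5, pv_step_cnt labels _ hncl _ _ hlab]
      · -- first occurrence of the group: insert branch
        have hc : R.1.contains x = false := by
          rw [← Bool.not_eq_true, PySem.Dict.contains_iff_mem_keys, ih1, PySem.List.mem_dedup]
          exact hx
        have hc2 : R.2.1.contains x = false := by
          rw [← Bool.not_eq_true, PySem.Dict.contains_iff_mem_keys, ih2, PySem.List.mem_dedup]
          exact hx
        have hstep : pvFoldA labels (xs ++ [x])
            = ((R.1.insert x (List.replicate (pvClasses labels).length (0 : Int))).modify x []
                (fun v => PySem.List.pySetD v
                  ((pvPos (pvClasses labels)).getD (PySem.List.pyGetD labels ((xs.length : Nat) : Int) 0) 0)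
                  (PySem.List.pyGetD v
                    ((pvPos (pvClasses labels)).getD (PySem.List.pyGetD labels ((xs.length : Nat) : Int) 0) 0) 0 + 1)),
               (R.2.1.insert x []).modify x [] (fun v => v ++ [((xs.length : Nat) : Int)]),
               PySem.List.pySetD R.2.2
                 ((pvPos (pvClasses labels)).getD (PySem.List.pyGetD labels ((xs.length : Nat) : Int) 0) 0)
                 (PySem.List.pyGetD R.2.2
                   ((pvPos (pvClasses labels)).getD (PySem.List.pyGetD labels ((xs.length : Nat) : Int) 0) 0) 0 + 1)) := by
          rw [hfold, pvStepA]
          simp only [hc, Bool.false_eq_true, if_false]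
        rw [hstep]
        have hrepl : List.replicate (pvClasses labels).length (0 : Int)
            = pvCnt labels (pvClasses labels) [] := by
          simp [pvCnt]
        refine ⟨?_, ?_, ?_, ?_, ?_⟩
        · rw [PySem.Dict.keys_modify,
            PySem.Dict.keys_insert_of_contains _ _ (PySem.Dict.contains_insert_self _ _ _),
            PySem.Dict.keys_insert_of_not_contains _ _ hc, ih1, pv_dedup_append, if_neg hx]
        · rw [PySem.Dict.keys_modify,
            PySem.Dict.keys_insert_of_contains _ _ (PySem.Dict.contains_insert_self _ _ _),
            PySem.Dict.keys_insert_of_not_contains _ _ hc2, ih2, pv_dedup_append, if_neg hx]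
        · intro g hg
          rw [PySem.Dict.getD_modify]
          by_cases hgx : g = x
          · subst hgx
            rw [if_pos rfl, PySem.Dict.getD_insert, if_pos rfl, hrepl,
              pv_step_cnt labels _ hncl _ _ hlab,
              pvIdxs_append, if_pos (by simp), pvIdxs_not_mem xs g hx, List.nil_append]
          · have hgxs : g ∈ xs := by
              rcases List.mem_append.mp hg with h1 | h1
              · exact h1
              · exact absurd (List.mem_singleton.mp h1) hgx
            rw [if_neg hgx, PySem.Dict.getD_insert, if_neg hgx, ih3 g hgxs, pvIdxs_append,
              if_neg (by simp; exact fun h => hgx h.symm), List.append_nil]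
        · intro g hg
          rw [PySem.Dict.getD_modify]
          by_cases hgx : g = x
          · subst hgx
            rw [if_pos rfl, PySem.Dict.getD_insert, if_pos rfl, pvIdxs_append, if_pos (by simp),
              pvIdxs_not_mem xs g hx, List.nil_append]
          · have hgxs : g ∈ xs := by
              rcases List.mem_append.mp hg with h1 | h1
              · exact h1
              · exact absurd (List.mem_singleton.mp h1) hgx
            rw [if_neg hgx, PySem.Dict.getD_insert, if_neg hgx, ih4 g hgxs, pvIdxs_append,
              if_neg (by simp; exact fun h => hgx h.symm), List.append_nil]
        · rw [hall, ih5, pv_step_cnt labels _ hncl _ _ hlab]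

-- ===== VERDICT (by name: the statement is the Claim_ definition above) =====
theorem build_group_stats_py_spec : Claim_equal_build_group_stats_py := by
  intro pids labels _ hpre
  show build_group_stats_py pids labels = build_group_stats_py_alt pids labels
  obtain ⟨ih1, ih2, ih3, ih4, ih5⟩ := pv_foldA labels pids hpre
  have hndk : (PySem.List.dedup pids).Nodup := PySem.List.nodup_dedup pids
  set gtiB := (PySem.List.enumerate pids 0).foldl
      (fun d p => d.modify p.2 [] (fun v => v ++ [p.1]))
      (PySem.Dict.empty : PySem.Dict String (List Int)) with hgtiB
  have hBkeys : gtiB.keys = PySem.List.dedup pids := by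
    rw [hgtiB, PySem.Dict.keys_foldl_modify_key (PySem.List.enumerate pids 0) (fun p => p.2) []
      (fun _ p => (fun v => v ++ [p.1])) PySem.Dict.empty]
    simp [PySem.List.map_snd_enumerate, PySem.Set.update, ← PySem.Set.ofList_eq_foldl]
  have hBget : ∀ g, gtiB.getD g [] = pvIdxs pids g := by
    intro g
    rw [hgtiB,
      show (PySem.List.enumerate pids 0).foldl
          (fun d p => d.modify p.2 [] (fun v => v ++ [p.1]))
          (PySem.Dict.empty : PySem.Dict String (List Int))
        = ((PySem.List.enumerate pids 0).map (fun p => (p.2, p.1))).foldl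
          (fun d q => d.modify q.1 [] (fun v => v ++ [q.2])) PySem.Dict.empty
        from (@List.foldl_map (Int × String) (String × Int) (PySem.Dict String (List Int))
          (fun p => (p.2, p.1)) (fun d q => d.modify q.1 [] (fun v => v ++ [q.2]))
          (PySem.List.enumerate pids 0) PySem.Dict.empty).symm,
      PySem.Dict.getD_foldl_modify_append]
    simp only [pvIdxs, List.filter_map, List.map_map]
    rfl
  have hBitems : gtiB.items = (PySem.List.dedup pids).map (fun g => (g, pvIdxs pids g)) := by
    rw [PySem.Dict.items_eq_map_keys gtiB (hBkeys ▸ hndk) [], hBkeys]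
    exact List.map_congr_left (fun g _ => by rw [hBget g])
  have hAitemsI : (pvFoldA labels pids).2.1.items
      = (PySem.List.dedup pids).map (fun g => (g, pvIdxs pids g)) := by
    rw [PySem.Dict.items_eq_map_keys _ (ih2 ▸ hndk) [], ih2]
    exact List.map_congr_left (fun g hg => by rw [ih4 g ((PySem.List.mem_dedup _ _).mp hg)])
  have hAitemsC : (pvFoldA labels pids).1.items
      = (PySem.List.dedup pids).map
          (fun g => (g, pvCnt labels (pvClasses labels) (pvIdxs pids g))) := by
    rw [PySem.Dict.items_eq_map_keys _ (ih1 ▸ hndk) [], ih1]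
    exact List.map_congr_left (fun g hg => by rw [ih3 g ((PySem.List.mem_dedup _ _).mp hg)])
  set gtcB := gtiB.items.foldl
      (fun d q =>
        let freq : PySem.Dict Int Int :=
          q.2.foldl (fun f i => f.modify (PySem.List.pyGetD labels i 0) 0 (fun v => v + 1))
            PySem.Dict.empty
        d.insert q.1 ((pvClasses labels).map (fun c => freq.getD c 0)))
      (PySem.Dict.empty : PySem.Dict String (List Int)) with hgtcB
  have hgtc2 : gtcB = gtiB.items.foldl
      (fun d q => d.insert q.1 (pvCnt labels (pvClasses labels) q.2))
      (PySem.Dict.empty : PySem.Dict String (List Int)) := by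
    rw [hgtcB]
    congr 1
    funext d q
    show d.insert q.1 ((pvClasses labels).map (fun c => (q.2.foldl
        (fun f i => f.modify (PySem.List.pyGetD labels i 0) 0 (fun v => v + 1))
        (PySem.Dict.empty : PySem.Dict Int Int)).getD c 0)) = _
    rw [pv_freq_vec labels (pvClasses labels) q.2]
  have hBitemsC : gtcB.items
      = (PySem.List.dedup pids).map
          (fun g => (g, pvCnt labels (pvClasses labels) (pvIdxs pids g))) := by
    rw [hgtc2, PySem.Dict.items_foldl_insert_fresh gtiB.items (fun q => q.1)
      (fun q => pvCnt labels (pvClasses labels) q.2) PySem.Dict.empty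
      (fun a _ => PySem.Dict.contains_empty a.1)
      (by rw [show gtiB.items.map (fun q => q.1) = gtiB.keys from rfl, hBkeys]; exact hndk)]
    rw [show (PySem.Dict.empty : PySem.Dict String (List Int)).items = [] from rfl,
      List.nil_append, hBitems]
    simp [List.map_map, Function.comp]
  have hA : build_group_stats_py pids labels
      = ((pvFoldA labels pids).2.1.items, (pvFoldA labels pids).1.items,
         (pvFoldA labels pids).2.2) := rfl
  have hB : build_group_stats_py_alt pids labels
      = (gtiB.items, gtcB.items,
         (pvClasses labels).map (fun c =>
           ((PySem.List.pyRange 0 (pids.length : Int) 1).foldl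
             (fun f i => f.modify (PySem.List.pyGetD labels i 0) 0 (fun v => v + 1))
             (PySem.Dict.empty : PySem.Dict Int Int)).getD c 0)) := rfl
  rw [hA, hB, hAitemsI, hAitemsC, hBitems, hBitemsC, ih5,
    pv_freq_vec labels (pvClasses labels) (PySem.List.pyRange 0 (pids.length : Int) 1)]
  simp only [Prod.mk.injEq, true_and]
  rw [show (PySem.List.enumerate pids 0).map (fun p => p.1)
      = PySem.List.pyRange 0 (0 + (pids.length : Int)) 1 from PySem.List.map_fst_enumerate pids 0]
  simp
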